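-- pv_equiv track=rewrite | github.com/bmanandhar/python-hacker-rank | vanity_phone.py | match_vanity_phone
-- ===== SOURCE A (Python) =====
-- def match_vanity_phone(codes, numbers):
--
--     #numbers and corresponding code-characters
--     num2 = ['2', 'ABC']
--     num3 = ['3', 'DEF']
--     num4 = ['4', 'GHI']
--     num5 = ['5', 'JKL']
--     num6 = ['6', 'MNO']
--     num7 = ['7', 'PQRS']
--     num8 = ['8', 'TUV']
--     num9 = ['9', 'WXYZ']
--
--     #array of number/code
--     num_code = [num2, num3, num4, num5, num6, num7, num8, num9]
--
--     #array to collect number converted from code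
--     code_to_num_arr = []
--
--     #array to collect selected phone-nos
--     selected_phones = []
--
--     #string to form code-converted number
--     temp = ''
--
--     #iterates thru array of codes
--     for code in codes:
--
--         #checking each chars to convert to number
--         for i in range(len(code)):
--
--             #tracks corresponding number matched with alpha-character
--             for j in range(len(num_code)):
--
--                 #matching each character to get corresponding number
--                 if code[i] in num_code[j][1]:
--
--                     #forming corresponding number to match alpha-code
--                     temp += num_code[j][0]
--
--         #forming array of code-converted numbers
--         code_to_num_arr.append(temp)
--
--         #after each alpha-code in the array, temp is made empty
--         temp = ''
--
--     #search for matching number to select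
--     for num in code_to_num_arr:
--
--         #iterates array of telephone numbers in search of corresponding alpha codes
--         for number in numbers:
--
--             #checks if the alpha code is present as the last string in the number
--             if num == number[-len(num):]:
--
--                 #if found, adds to the array
--                 selected_phones.append(number)
--
--     return selected_phones
-- ===== SOURCE B (Python) =====
-- def match_vanity_phone(codes, numbers):
--     # letter -> digit lookup table
--     digit = {}
--     for d, letters in (("2", "ABC"), ("3", "DEF"), ("4", "GHI"), ("5", "JKL"),
--                        ("6", "MNO"), ("7", "PQRS"), ("8", "TUV"), ("9", "WXYZ")):
--         for ch in letters:
--             digit[ch] = d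
--
--     # convert each alpha code to its digit string
--     nums = []
--     for code in codes:
--         s = ''
--         for ch in code:
--             s += digit.get(ch, '')
--         nums.append(s)
--
--     # distinct converted-code lengths, in first-seen order
--     lengths = []
--     for n in nums:
--         if len(n) not in lengths:
--             lengths.append(len(n))
--
--     # index the phone numbers once: (length, suffix of that length) -> numbers, in order
--     index = {}
--     for number in numbers:
--         for L in lengths:
--             index.setdefault((L, number[-L:]), []).append(number)
--
--     # one lookup per converted code
--     out = []
--     for n in nums:
--         out.extend(index.get((len(n), n), []))
--     return out
-- ===== Notes on version B (the rewrite author's own statement) =====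
-- stated objective: faster
-- what changed: B replaces A's per-character scan of the 8 letter groups with a precomputed letter-to-digit dict, and replaces A's quadratic codes-times-numbers matching scan with a (length, suffix)->numbers index built in one pass over the numbers, then one lookup per converted code.
import Mathlib
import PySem

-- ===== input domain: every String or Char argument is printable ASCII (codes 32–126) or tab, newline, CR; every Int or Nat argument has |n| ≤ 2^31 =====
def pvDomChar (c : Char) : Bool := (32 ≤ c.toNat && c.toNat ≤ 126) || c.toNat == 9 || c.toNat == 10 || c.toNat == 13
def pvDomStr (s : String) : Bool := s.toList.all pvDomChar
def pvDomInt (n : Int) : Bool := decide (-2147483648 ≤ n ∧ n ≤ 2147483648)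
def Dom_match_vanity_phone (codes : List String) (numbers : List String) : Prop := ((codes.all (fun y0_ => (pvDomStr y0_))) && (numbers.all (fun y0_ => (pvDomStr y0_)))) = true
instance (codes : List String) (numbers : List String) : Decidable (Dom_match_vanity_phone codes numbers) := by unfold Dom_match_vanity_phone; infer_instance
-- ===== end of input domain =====

-- B replaces A's per-character scan of the 8 letter groups by a letter→digit dict and A's
-- quadratic code×numbers matching scan by a (length, suffix)→numbers index built once (objective: faster).

-- ===== PORT A =====
def pvNumCode : List (String × String) :=
  [("2", "ABC"), ("3", "DEF"), ("4", "GHI"), ("5", "JKL"),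
   ("6", "MNO"), ("7", "PQRS"), ("8", "TUV"), ("9", "WXYZ")]

-- the two inner loops of A's conversion phase ('for i in range(len(code)): for j in …')
def pvConvA (code : String) : String :=
  code.toList.foldl (fun temp c =>
    pvNumCode.foldl (fun temp g =>
      if PySem.Str.isIn (String.ofList [c]) g.2 then temp ++ g.1 else temp) temp) ""

def match_vanity_phone (codes : List String) (numbers : List String) : List String :=
  let code_to_num_arr := codes.foldl (fun arr code => arr ++ [pvConvA code]) []
  code_to_num_arr.foldl (fun sel num =>
    numbers.foldl (fun sel number =>
      if num == PySem.Str.slice number (some (-(PySem.Str.len num))) none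
      then sel ++ [number] else sel) sel) []

-- ===== PORT B =====
def pvGroupsB : List (String × String) :=
  [("2", "ABC"), ("3", "DEF"), ("4", "GHI"), ("5", "JKL"),
   ("6", "MNO"), ("7", "PQRS"), ("8", "TUV"), ("9", "WXYZ")]

-- Source B: digit = {}; for d, letters in …: for ch in letters: digit[ch] = d
def pvDigit : PySem.Dict Char String :=
  pvGroupsB.foldl (fun d g => g.2.toList.foldl (fun d ch => d.insert ch g.1) d) PySem.Dict.empty

-- Source B: s = ''; for ch in code: s += digit.get(ch, '')
def pvConvB (code : String) : String :=
  code.toList.foldl (fun s ch => s ++ pvDigit.getD ch "") ""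

def match_vanity_phone_alt (codes : List String) (numbers : List String) : List String :=
  let nums := codes.foldl (fun a code => a ++ [pvConvB code]) []
  let lengths := nums.foldl (fun ls n =>
    if ls.contains (PySem.Str.len n) then ls else ls ++ [PySem.Str.len n]) ([] : List Int)
  -- setdefault((L, number[-L:]), []).append(number)  =  d[k] = d.get(k, []) + [number]  =  Dict.modify
  let index := numbers.foldl (fun d number =>
    lengths.foldl (fun d L =>
      PySem.Dict.modify d (L, PySem.Str.slice number (some (-L)) none) [] (fun b => b ++ [number])) d)
    (PySem.Dict.empty : PySem.Dict (Int × String) (List String))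
  nums.foldl (fun out n => out ++ index.getD (PySem.Str.len n, n) []) []

-- ===== PRECONDITION & SPEC =====
def Spec_match_vanity_phone (codes : List String) (numbers : List String) (out : List String) : Prop := out = match_vanity_phone_alt codes numbers
instance (codes : List String) (numbers : List String) (out : List String) : Decidable (Spec_match_vanity_phone codes numbers out) := by unfold Spec_match_vanity_phone; infer_instance

-- ===== CLAIM (what is proved, stated in full; the proofs are below) =====
def Claim_equal_match_vanity_phone : Prop := ∀ (codes : List String) (numbers : List String), Dom_match_vanity_phone codes numbers → Spec_match_vanity_phone codes numbers (match_vanity_phone codes numbers)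

-- ===== LEMMAS AND PROOFS =====

-- the conversion step of A for one character, with arbitrary accumulated string
theorem pvInnerA_shift (c : Char) (gs : List (String × String)) (t : String) :
    gs.foldl (fun temp g => if PySem.Str.isIn (String.ofList [c]) g.2 then temp ++ g.1 else temp) t
      = t ++ gs.foldl (fun temp g => if PySem.Str.isIn (String.ofList [c]) g.2 then temp ++ g.1 else temp) "" := by
  induction gs generalizing t with
  | nil => simp [List.foldl]
  | cons g gs ih =>
    simp only [List.foldl]
    rw [ih, ih (if PySem.Str.isIn (String.ofList [c]) g.2 then "" ++ g.1 else "")]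
    split <;> simp [String.append_assoc]

-- per-character agreement of the two conversions, checked over all domain characters
set_option maxRecDepth 20000 in
theorem pvCharKey : ∀ n : Nat, n < 128 →
    pvNumCode.foldl (fun temp g =>
      if PySem.Str.isIn (String.ofList [Char.ofNat n]) g.2 then temp ++ g.1 else temp) ""
      = pvDigit.getD (Char.ofNat n) "" := by decide

theorem pvCharEq (c : Char) (h : pvDomChar c = true) :
    pvNumCode.foldl (fun temp g =>
      if PySem.Str.isIn (String.ofList [c]) g.2 then temp ++ g.1 else temp) ""
      = pvDigit.getD c "" := by
  have hlt : c.toNat < 128 := by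
    unfold pvDomChar at h
    simp only [Bool.or_eq_true, Bool.and_eq_true, beq_iff_eq, decide_eq_true_eq] at h
    omega
  have := pvCharKey c.toNat hlt
  rwa [Char.ofNat_toNat] at this

theorem pvConvEq (code : String) (h : pvDomStr code = true) : pvConvA code = pvConvB code := by
  unfold pvConvA pvConvB
  apply PySem.List.foldl_congr_mem
  intro acc c hc
  rw [pvInnerA_shift, pvCharEq c]
  simp only [pvDomStr, List.all_eq_true] at h
  exact h c hc

-- the dedup loop: result is Nodup and contains f x for every x of the list
theorem pvDedup_nodup {α β : Type} [BEq α] [LawfulBEq α] (f : β → α) (l : List β) (acc : List α)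
    (h : acc.Nodup) :
    (l.foldl (fun ls n => if ls.contains (f n) then ls else ls ++ [f n]) acc).Nodup := by
  induction l generalizing acc with
  | nil => exact h
  | cons x l ih =>
    simp only [List.foldl]
    split
    · exact ih acc h
    · refine ih _ ?_
      rename_i hc
      simp only [List.contains_eq_mem, Bool.not_eq_true, decide_eq_false_iff_not] at hc
      have hnot : f x ∉ acc := by simpa [List.contains_eq_mem] using hc
      simp only [List.nodup_append, List.nodup_cons, List.not_mem_nil, not_false_iff,
        List.nodup_nil, and_true, true_and]
      refine ⟨h, ?_⟩
      intro a ha b hb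
      simp only [List.mem_singleton] at hb
      subst hb
      exact fun hax => hnot (hax ▸ ha)

-- the accumulator is preserved by the dedup loop (helper for pvDedup_mem)
theorem pvDedup_sub {α β : Type} [BEq α] [LawfulBEq α] (f : β → α) (l : List β) (acc : List α)
    (x : α) (hx : x ∈ acc) :
    x ∈ l.foldl (fun ls n => if ls.contains (f n) then ls else ls ++ [f n]) acc := by
  induction l generalizing acc with
  | nil => exact hx
  | cons y l ih =>
    simp only [List.foldl]
    split
    · exact ih acc hx
    · exact ih _ (by simp [hx])
theorem pvDedup_mem {α β : Type} [BEq α] [LawfulBEq α] (f : β → α) (l : List β) (acc : List α)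
    (x : β) (hx : x ∈ l) :
    f x ∈ l.foldl (fun ls n => if ls.contains (f n) then ls else ls ++ [f n]) acc := by
  induction l generalizing acc with
  | nil => cases hx
  | cons y l ih =>
    simp only [List.foldl]
    rcases List.mem_cons.mp hx with rfl | hx
    · by_cases hc : acc.contains (f x)
      · simp only [hc, if_true]
        have hmem : f x ∈ acc := by simpa [List.contains_eq_mem] using hc
        exact pvDedup_sub f l acc (f x) hmem
      · simp only [hc]
        exact pvDedup_sub f l _ (f x) (by simp)
    · split <;> exact ih _ hx


-- on a Nodup list containing L0, filtering for '(L == L0) && c L' yields [L0] iff c L0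
theorem pvFilter_nodup {α : Type} [BEq α] [LawfulBEq α] (lens : List α) (L0 : α) (c : α → Bool)
    (hnd : lens.Nodup) (hmem : L0 ∈ lens) :
    lens.filter (fun L => (L == L0) && c L) = if c L0 then [L0] else [] := by
  induction lens with
  | nil => cases hmem
  | cons y lens ih =>
    rcases List.mem_cons.mp hmem with rfl | hmem'
    · have hnotin : L0 ∉ lens := (List.nodup_cons.mp hnd).1
      have hrest : lens.filter (fun L => (L == L0) && c L) = [] := by
        apply List.filter_eq_nil_iff.mpr
        intro x hx
        simp only [Bool.and_eq_true, beq_iff_eq, not_and]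
        intro hxe
        exact absurd (hxe ▸ hx) hnotin
      rw [List.filter_cons, hrest]
      by_cases hc : c L0 = true <;> simp [hc]
    · have hne : y ≠ L0 := by
        rintro rfl
        exact (List.nodup_cons.mp hnd).1 hmem'
      rw [List.filter_cons, ih (List.nodup_cons.mp hnd).2 hmem']
      simp [hne]

-- filter as a flatMap of singletons
theorem pvFilter_eq_flatMap {α : Type} (l : List α) (p : α → Bool) :
    l.filter p = l.flatMap (fun x => if p x then [x] else []) := by
  induction l with
  | nil => rfl
  | cons x l ih => by_cases h : p x <;> simp [h, ih]

-- filter distributes over flatMap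
theorem pvFilter_flatMap {α β : Type} (l : List α) (f : α → List β) (q : β → Bool) :
    (l.flatMap f).filter q = l.flatMap (fun x => (f x).filter q) := by
  induction l with
  | nil => rfl
  | cons x l ih => simp [List.flatMap_cons, List.filter_append, ih]

theorem pvBeqComm (s t : String) : (s == t) = (t == s) := by
  by_cases h : s = t
  · subst h; rfl
  · rw [beq_eq_false_iff_ne.mpr h, beq_eq_false_iff_ne.mpr (Ne.symm h)]

-- ===== VERDICT (by name: the statement is the Claim_ definition above) =====
theorem match_vanity_phone_spec : Claim_equal_match_vanity_phone := by
  intro codes numbers hdom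
  have hcodes : ∀ code ∈ codes, pvDomStr code = true := by
    unfold Dom_match_vanity_phone at hdom
    simp only [Bool.and_eq_true, List.all_eq_true] at hdom
    exact hdom.1
  show match_vanity_phone codes numbers = match_vanity_phone_alt codes numbers
  simp only [match_vanity_phone, match_vanity_phone_alt]
  rw [PySem.List.foldl_append_singleton_eq_map pvConvA,
      PySem.List.foldl_append_singleton_eq_map pvConvB]
  simp only [List.nil_append]
  rw [List.map_congr_left (fun code hc => pvConvEq code (hcodes code hc))]
  rw [PySem.List.foldl_congr_mem (codes.map pvConvB) _
      (fun sel num => sel ++ numbers.filter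
        (fun number => num == PySem.Str.slice number (some (-(PySem.Str.len num))) none)) []
      (fun sel num _ => PySem.List.foldl_append_if_eq_filter _ numbers sel)]
  rw [PySem.List.foldl_append_eq_flatMap, PySem.List.foldl_append_eq_flatMap]
  simp only [List.nil_append]
  apply List.flatMap_congr
  intro n hn
  have hnd : (List.foldl (fun ls m => if ls.contains (PySem.Str.len m) then ls
      else ls ++ [PySem.Str.len m]) ([] : List Int) (codes.map pvConvB)).Nodup :=
    pvDedup_nodup PySem.Str.len (codes.map pvConvB) [] List.nodup_nil
  have hmem : PySem.Str.len n ∈ List.foldl (fun ls m => if ls.contains (PySem.Str.len m) then ls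
      else ls ++ [PySem.Str.len m]) ([] : List Int) (codes.map pvConvB) :=
    pvDedup_mem PySem.Str.len (codes.map pvConvB) [] n hn
  rw [show (List.foldl (fun d number =>
        List.foldl (fun d L =>
          PySem.Dict.modify d (L, PySem.Str.slice number (some (-L)) none) [] (fun b => b ++ [number]))
          d
          (List.foldl (fun ls m => if ls.contains (PySem.Str.len m) then ls
            else ls ++ [PySem.Str.len m]) ([] : List Int) (codes.map pvConvB)))
        (PySem.Dict.empty : PySem.Dict (Int × String) (List String)) numbers)
      = (List.foldl (fun d p => PySem.Dict.modify d p.1 [] (fun b => b ++ [p.2]))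
          (PySem.Dict.empty : PySem.Dict (Int × String) (List String))
          (numbers.flatMap (fun number =>
            (List.foldl (fun ls m => if ls.contains (PySem.Str.len m) then ls
              else ls ++ [PySem.Str.len m]) ([] : List Int) (codes.map pvConvB)).map
              (fun L => ((L, PySem.Str.slice number (some (-L)) none), number)))))
    from by rw [List.foldl_flatMap]; simp only [List.foldl_map]]
  rw [PySem.Dict.getD_foldl_modify_append]
  rw [PySem.Dict.getD_empty]
  simp only [List.nil_append]
  rw [pvFilter_flatMap, List.map_flatMap]
  rw [pvFilter_eq_flatMap]
  apply List.flatMap_congr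
  intro number _
  rw [List.filter_map, List.map_map]
  show (if (n == PySem.Str.slice number (some (-(PySem.Str.len n))) none) = true
        then [number] else [])
      = List.map (fun _ => number)
        (List.filter
          (fun L => (L == PySem.Str.len n) && (PySem.Str.slice number (some (-L)) none == n))
          (List.foldl (fun ls m => if ls.contains (PySem.Str.len m) then ls
            else ls ++ [PySem.Str.len m]) ([] : List Int) (codes.map pvConvB)))
  rw [pvFilter_nodup _ _ _ hnd hmem]
  rw [pvBeqComm]
  by_cases hc : PySem.Str.slice number (some (-(n.length : Int))) none = n <;>
    simp [PySem.Str.len, hc]
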